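-- pv_equiv track=rewrite | github.com/shiyi-oo/hypergraph-lower-ricci-curvature | code/special_hypg/generate_special_hypergraphs.py | generate_hypercycle
-- ===== SOURCE A (Python) =====
-- def generate_hypercycle(k, s, m):
--     """
--     Create a hypercycle with m hyperedges, where each hyperedge has k nodes
--     and consecutive hyperedges overlap by s nodes.
--
--     Parameters:
--     k (int): Number of nodes in each hyperedge.
--     s (int): Overlap size between consecutive hyperedges.
--     m (int): Number of hyperedges in the hypercycle.
--
--     Returns:
--     list: A list of hyperedges, where each hyperedge is a set of nodes.
--     """
--     if s >= k:
--         raise ValueError("Overlap size 's' must be less than the number of nodes 'k' in each hyperedge.")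
--
--     hypercycle = []
--     # total_nodes = (k - s) * (m+1) - 2*(2*s-k) # Total number of unique nodes needed for the hypercycle
--     total_nodes = (k - s) * m
--
--     if total_nodes < k:
--         raise ValueError(f"too small m or too large k, where k= {k}, s = {s}, m = {m}")
--     nodes = list(range(total_nodes))  # Create a list of nodes
--
--     for i in range(m):
--         # Start index for the hyperedge
--         start = i * (k - s)
--         # Create the hyperedge
--         if len(list(nodes[start:start + k]))<k:
--             d = k-len(list(nodes[start:start + k]))
--             hyperedge = list(nodes[start:start + k]) + (list(nodes[:d]))
--         else:
--             hyperedge = list(nodes[start:start + k])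
--         hypercycle.append(hyperedge)
--
--     return hypercycle
-- ===== SOURCE B (Python) =====
-- def generate_hypercycle(k, s, m):
--     """
--     Create a hypercycle with m hyperedges, where each hyperedge has k nodes
--     and consecutive hyperedges overlap by s nodes.
--     """
--     if s >= k:
--         raise ValueError("Overlap size 's' must be less than the number of nodes 'k' in each hyperedge.")
--
--     total_nodes = (k - s) * m
--
--     if total_nodes < k:
--         raise ValueError(f"too small m or too large k, where k= {k}, s = {s}, m = {m}")
--
--     return [[(i * (k - s) + j) % total_nodes for j in range(k)] for i in range(m)]
-- ===== Notes on version B (the rewrite author's own statement) =====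
-- stated objective: simpler
-- what changed: Drops the materialized node list, the slicing and the conditional wraparound branch: each hyperedge is computed directly by modular arithmetic, (i*(k-s)+j) % total_nodes.
-- outside the precondition, e.g. on generate_hypercycle(-1, -2, 5): A returns [[0, 1, 2, 3], [], [], [], []], B returns [[], [], [], [], []]
import Mathlib
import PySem

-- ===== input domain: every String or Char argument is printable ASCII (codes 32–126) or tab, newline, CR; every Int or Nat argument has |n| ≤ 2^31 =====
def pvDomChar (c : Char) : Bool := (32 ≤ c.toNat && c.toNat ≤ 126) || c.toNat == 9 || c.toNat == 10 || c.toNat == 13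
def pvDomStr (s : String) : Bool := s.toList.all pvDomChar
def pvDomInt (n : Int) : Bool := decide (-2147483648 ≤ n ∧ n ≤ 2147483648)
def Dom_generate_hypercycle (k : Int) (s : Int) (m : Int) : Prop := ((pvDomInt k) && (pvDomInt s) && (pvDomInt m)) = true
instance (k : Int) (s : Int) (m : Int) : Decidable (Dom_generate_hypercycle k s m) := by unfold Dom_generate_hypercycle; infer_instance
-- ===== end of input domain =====

-- B replaces A's node list, slicing and wraparound branch by direct modular indexing (objective: simpler).


-- ===== PORT A =====
def generate_hypercycle (k : Int) (s : Int) (m : Int) : List (List Int) :=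
  let total_nodes := (k - s) * m
  let nodes := PySem.List.pyRange 0 total_nodes 1
  (PySem.List.pyRange 0 m 1).foldl (fun hypercycle i =>
    let start := i * (k - s)
    let sl := PySem.List.slice nodes (some start) (some (start + k))
    let hyperedge :=
      if (sl.length : Int) < k then
        sl ++ PySem.List.slice nodes none (some (k - (sl.length : Int)))
      else sl
    hypercycle ++ [hyperedge]) []

-- ===== PORT B =====
def generate_hypercycle_alt (k : Int) (s : Int) (m : Int) : List (List Int) :=
  let total_nodes := (k - s) * m
  (PySem.List.pyRange 0 m 1).map (fun i =>
    (PySem.List.pyRange 0 k 1).map (fun j => PySem.Int.mod (i * (k - s) + j) total_nodes))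

-- ===== PRECONDITION & SPEC =====
-- Pre_ excludes A's two ValueError cases (s ≥ k, (k-s)*m < k) and, in addition, exactly the
-- degenerate inputs k < 0 with m ≥ 1 and (k-s)*m + k > 0, on which A's slice stop start+k is a
-- negative Python index and A returns a nonempty first hyperedge as an artefact of slicing,
-- while B naturally returns empty hyperedges (range(k) is empty for k < 0).
def Pre_generate_hypercycle (k : Int) (s : Int) (m : Int) : Prop :=
  s < k ∧ k ≤ (k - s) * m ∧ (0 ≤ k ∨ m ≤ 0 ∨ (k - s) * m + k ≤ 0)
instance (k : Int) (s : Int) (m : Int) : Decidable (Pre_generate_hypercycle k s m) := by unfold Pre_generate_hypercycle; infer_instance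
def pvWitness_generate_hypercycle : Int × Int × Int := (3, 1, 4)

def Spec_generate_hypercycle (k : Int) (s : Int) (m : Int) (out : List (List Int)) : Prop := out = generate_hypercycle_alt k s m
instance (k : Int) (s : Int) (m : Int) (out : List (List Int)) : Decidable (Spec_generate_hypercycle k s m out) := by unfold Spec_generate_hypercycle; infer_instance

-- ===== CLAIM (what is proved, stated in full; the proofs are below) =====
def Claim_equal_generate_hypercycle : Prop := ∀ (k : Int) (s : Int) (m : Int), Dom_generate_hypercycle k s m → Pre_generate_hypercycle k s m → Spec_generate_hypercycle k s m (generate_hypercycle k s m)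

-- ===== LEMMAS AND PROOFS =====

-- An empty Python slice xs[a:b] (0 ≤ a, b ≤ a, and b clamped no further right than a).
lemma slice_eq_nil (xs : List Int) (a b : Int) (h0 : 0 ≤ a) (hb : b ≤ a)
    (hkey : (xs.length : Int) + b ≤ a ∨ b = a) :
    PySem.List.slice xs (some a) (some b) = [] := by
  have hl := PySem.List.length_slice xs a b
  have h2 : PySem.List.clampIdx xs.length b ≤ PySem.List.clampIdx xs.length a := by
    unfold PySem.List.clampIdx; split_ifs <;> omega
  apply List.eq_nil_of_length_eq_zero
  omega

-- For each admissible i with 1 ≤ k, A's hyperedge (slice + wraparound) equals B's modular row.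
lemma hyperedge_eq (k s m i : Int) (hk : 1 ≤ k) (hs : s < k) (htot : k ≤ (k - s) * m)
    (hi : 0 ≤ i) (him : i < m) :
    (let total_nodes := (k - s) * m
     let nodes := PySem.List.pyRange 0 total_nodes 1
     let start := i * (k - s)
     let sl := PySem.List.slice nodes (some start) (some (start + k))
     if (sl.length : Int) < k then
       sl ++ PySem.List.slice nodes none (some (k - (sl.length : Int)))
     else sl)
    = (PySem.List.pyRange 0 k 1).map (fun j => PySem.Int.mod (i * (k - s) + j) ((k - s) * m)) := by
  have hd : (0:Int) < k - s := by omega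
  have hstart0 : (0:Int) ≤ i * (k - s) := mul_nonneg hi (le_of_lt hd)
  have hstartd : i * (k - s) + (k - s) ≤ (k - s) * m := by
    have h1 : (i + 1) * (k - s) ≤ m * (k - s) :=
      mul_le_mul_of_nonneg_right (by omega) (le_of_lt hd)
    nlinarith
  have hn : (0:Int) < (k - s) * m := by omega
  generalize hST : i * (k - s) = start at *
  generalize hN : (k - s) * m = n at *
  dsimp only
  have h0k : (0:Int) ≤ start + k := by omega
  rw [PySem.List.slice_toNat _ hstart0 h0k]
  have hlen : ((PySem.List.pyRange 0 n 1).drop start.toNat |>.take ((start+k).toNat - start.toNat)).length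
      = min ((start+k).toNat - start.toNat) (n.toNat - start.toNat) := by
    simp [PySem.List.length_pyRange_one]
  by_cases hw : start + k ≤ n
  · rw [if_neg (by rw [hlen]; push_cast; omega)]
    apply List.ext_getElem
    · simp [hlen, PySem.List.length_pyRange_one]; omega
    · intro j h1 h2
      rw [hlen] at h1
      simp only [List.getElem_take, List.getElem_drop, List.getElem_map]
      rw [PySem.List.getElem_pyRange_one, PySem.List.getElem_pyRange_one,
        PySem.Int.mod_eq_emod_of_pos hn,
        Int.emod_eq_of_lt (by omega) (by omega)]
      omega
  · rw [if_pos (by rw [hlen]; push_cast; omega)]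
    have hd2 : (0:Int) ≤ k - ↑((PySem.List.pyRange 0 n 1).drop start.toNat |>.take ((start+k).toNat - start.toNat)).length := by
      rw [hlen]; push_cast; omega
    rw [PySem.List.slice_to _ hd2]
    apply List.ext_getElem
    · simp only [List.length_append, List.length_take, List.length_map, List.length_drop,
        PySem.List.length_pyRange_one]
      push_cast; omega
    · intro j h1 h2
      simp only [List.length_map, PySem.List.length_pyRange_one] at h2
      rw [List.getElem_append, List.getElem_map, PySem.List.getElem_pyRange_one,
        PySem.Int.mod_eq_emod_of_pos hn]
      split
      · rename_i hlt
        rw [List.getElem_take, List.getElem_drop, PySem.List.getElem_pyRange_one]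
        rw [hlen] at hlt
        rw [Int.emod_eq_of_lt (by omega) (by omega)]
        omega
      · rename_i hge
        rw [List.getElem_take, PySem.List.getElem_pyRange_one]
        rw [hlen] at hge
        rw [show start + (0 + (j:Int)) = (start + ↑j - n) + n * 1 by ring,
          Int.add_mul_emod_self_left, Int.emod_eq_of_lt (by omega) (by omega)]
        omega

-- Degenerate admissible case k ≤ 0 (with k = 0, or (k-s)*m + k ≤ 0): both hyperedges are empty.
lemma hyperedge_eq_degen (k s m i : Int) (hk : k ≤ 0) (hs : s < k)
    (hdeg : (k - s) * m + k ≤ 0 ∨ k = 0) (hi : 0 ≤ i) (him : i < m) :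
    (let total_nodes := (k - s) * m
     let nodes := PySem.List.pyRange 0 total_nodes 1
     let start := i * (k - s)
     let sl := PySem.List.slice nodes (some start) (some (start + k))
     if (sl.length : Int) < k then
       sl ++ PySem.List.slice nodes none (some (k - (sl.length : Int)))
     else sl)
    = (PySem.List.pyRange 0 k 1).map (fun j => PySem.Int.mod (i * (k - s) + j) ((k - s) * m)) := by
  have hd : (0:Int) < k - s := by omega
  have h1 : (k - s) * 1 ≤ (k - s) * m := mul_le_mul_of_nonneg_left (by omega) (le_of_lt hd)
  rw [mul_one] at h1
  have hstart0 : (0:Int) ≤ i * (k - s) := mul_nonneg hi (le_of_lt hd)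
  generalize hST : i * (k - s) = start at *
  generalize hN : (k - s) * m = n at *
  dsimp only
  rw [slice_eq_nil _ _ _ hstart0 (by omega)
    (by simp only [PySem.List.length_pyRange_one]; omega)]
  rw [if_neg (by simp only [List.length_nil]; omega)]
  rw [PySem.List.pyRange_one 0 k]
  rw [show (k - 0).toNat = 0 by omega]
  simp

-- ===== VERDICT (by name: the statement is the Claim_ definition above) =====
theorem generate_hypercycle_spec : Claim_equal_generate_hypercycle := by
  intro k s m _ hpre
  obtain ⟨hs, htot, hcase⟩ := hpre
  unfold Spec_generate_hypercycle generate_hypercycle generate_hypercycle_alt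
  rw [PySem.List.foldl_append_singleton_eq_map]
  refine List.map_congr_left ?_
  intro i hmem
  rw [PySem.List.mem_pyRange_one] at hmem
  by_cases hk1 : 1 ≤ k
  · exact hyperedge_eq k s m i hk1 hs htot hmem.1 hmem.2
  · rcases hcase with h | h | h
    · exact hyperedge_eq_degen k s m i (by omega) hs (Or.inr (by omega)) hmem.1 hmem.2
    · omega
    · exact hyperedge_eq_degen k s m i (by omega) hs (Or.inl h) hmem.1 hmem.2
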